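-- pv_equiv track=rewrite | github.com/ispentanhouronthis/GreenPulseX | backend/data/data_processor.py | _count_dry_spells
-- ===== SOURCE A (Python) =====
-- def _count_dry_spells(rainfall_data):
--     """Count consecutive days with no rain"""
--     dry_spells = 0
--     current_dry_days = 0
--
--     for rain in rainfall_data:
--         if rain < 1:  # Less than 1mm considered dry
--             current_dry_days += 1
--         else:
--             if current_dry_days >= 3:  # 3+ consecutive dry days = dry spell
--                 dry_spells += 1
--             current_dry_days = 0
--
--     return dry_spells
-- ===== SOURCE B (Python) =====
-- def _count_dry_spells(rainfall_data):
--     # Stateless sliding-window scan: a dry spell is counted by A exactly when a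
--     # wet day (>= 1mm) is immediately preceded by 3 consecutive dry days.
--     xs = list(rainfall_data)
--     return sum(
--         1
--         for a, b, c, d in zip(xs, xs[1:], xs[2:], xs[3:])
--         if a < 1 and b < 1 and c < 1 and d >= 1
--     )
-- ===== Notes on version B (the rewrite author's own statement) =====
-- stated objective: alternative
-- what changed: Replaces A's stateful run-length accumulator with a stateless sliding-window count of length-4 windows (3 dry days followed by a wet day), which is exactly when A increments.
import Mathlib
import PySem

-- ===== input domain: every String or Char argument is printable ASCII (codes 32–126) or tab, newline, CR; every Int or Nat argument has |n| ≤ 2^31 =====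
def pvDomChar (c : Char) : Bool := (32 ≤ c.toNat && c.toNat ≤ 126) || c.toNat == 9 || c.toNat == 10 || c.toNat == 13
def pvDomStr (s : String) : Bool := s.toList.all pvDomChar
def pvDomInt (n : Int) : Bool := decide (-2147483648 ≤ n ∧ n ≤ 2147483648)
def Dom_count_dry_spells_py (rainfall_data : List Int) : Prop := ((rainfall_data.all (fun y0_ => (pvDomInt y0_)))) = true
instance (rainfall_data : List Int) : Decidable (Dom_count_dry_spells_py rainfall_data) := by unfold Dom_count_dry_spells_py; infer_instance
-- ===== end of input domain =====

-- B replaces A's stateful run-length scan by a stateless sliding-window count; objective: alternative.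

-- ===== PORT A =====
def count_dry_spells_py (rainfall_data : List Int) : Int :=
  -- for rain in rainfall_data: stateful (dry_spells, current_dry_days) accumulator
  (rainfall_data.foldl
    (fun (st : Int × Int) rain =>
      if rain < 1 then (st.1, st.2 + 1)
      else (if st.2 ≥ 3 then st.1 + 1 else st.1, 0))
    (0, 0)).1

-- ===== PORT B =====
def count_dry_spells_py_alt (rainfall_data : List Int) : Int :=
  -- zip(xs, xs[1:], xs[2:], xs[3:]) then sum of 1 over qualifying windows
  -- (xs[k:] with k ≥ 0 is List.drop k, exact here)
  (((rainfall_data.zip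
      ((rainfall_data.drop 1).zip
        ((rainfall_data.drop 2).zip (rainfall_data.drop 3)))).filter
    (fun w => decide (w.1 < 1) && decide (w.2.1 < 1) && decide (w.2.2.1 < 1)
                && decide (1 ≤ w.2.2.2))).length : Int)

-- ===== PRECONDITION & SPEC =====
def Spec_count_dry_spells_py (rainfall_data : List Int) (out : Int) : Prop := out = count_dry_spells_py_alt rainfall_data
instance (rainfall_data : List Int) (out : Int) : Decidable (Spec_count_dry_spells_py rainfall_data out) := by unfold Spec_count_dry_spells_py; infer_instance

-- ===== CLAIM (what is proved, stated in full; the proofs are below) =====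
def Claim_equal_count_dry_spells_py : Prop := ∀ (rainfall_data : List Int), Dom_count_dry_spells_py rainfall_data → Spec_count_dry_spells_py rainfall_data (count_dry_spells_py rainfall_data)

-- ===== LEMMAS AND PROOFS =====

-- window count over the dryness bitmap: windows [true,true,true,false]
def pvW : List Bool → Int
  | a :: b :: c :: d :: rest =>
      (if a && b && c && !d then 1 else 0) + pvW (b :: c :: d :: rest)
  | _ => 0

def pvBM (xs : List Int) : List Bool := xs.map (fun x => decide (x < 1))

theorem pvW_short (l : List Bool) (h : l.length ≤ 3) : pvW l = 0 := by
  match l with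
  | [] => rfl
  | [_] => rfl
  | [_, _] => rfl
  | [_, _, _] => rfl
  | _ :: _ :: _ :: _ :: _ => simp at h; exact absurd h (by omega)

theorem pvW_false (l : List Bool) : pvW (false :: l) = pvW l := by
  match l with
  | b :: c :: d :: rest => simp [pvW]
  | [] => rfl
  | [_] => rfl
  | [_, _] => rfl

theorem pvW_tf (l : List Bool) : pvW (true :: false :: l) = pvW l := by
  match l with
  | c :: d :: rest => simp [pvW, pvW_false]
  | [] => rfl
  | [_] => rfl

theorem pvW_ttf (l : List Bool) : pvW (true :: true :: false :: l) = pvW l := by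
  match l with
  | d :: rest => simp [pvW, pvW_tf]
  | [] => rfl

theorem pvW_tttf (l : List Bool) : pvW (true :: true :: true :: false :: l) = 1 + pvW l := by
  simp [pvW, pvW_ttf]

theorem pvW_tttt (l : List Bool) : pvW (true :: true :: true :: true :: l) = pvW (true :: true :: true :: l) := by
  simp [pvW]

-- the loop invariant: the fold from state (s, c) adds the window count of
-- (min c 3 dry days) ++ the remaining bitmap
theorem pvA_invariant (t : List Int) : ∀ (s c : Int), 0 ≤ c →
    (t.foldl
      (fun (st : Int × Int) rain =>
        if rain < 1 then (st.1, st.2 + 1)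
        else (if st.2 ≥ 3 then st.1 + 1 else st.1, 0))
      (s, c)).1
    = s + pvW (List.replicate (min c.toNat 3) true ++ pvBM t) := by
  induction t with
  | nil =>
      intro s c hc
      have h0 : pvW (List.replicate (min c.toNat 3) true ++ pvBM ([] : List Int)) = 0 := by
        apply pvW_short
        simp [pvBM]
      simp [List.foldl, h0]
  | cons r t ih =>
      intro s c hc
      by_cases hr : r < 1
      · have step : (List.foldl
            (fun (st : Int × Int) rain =>
              if rain < 1 then (st.1, st.2 + 1)
              else (if st.2 ≥ 3 then st.1 + 1 else st.1, 0))
            (s, c) (r :: t)) = (List.foldl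
            (fun (st : Int × Int) rain =>
              if rain < 1 then (st.1, st.2 + 1)
              else (if st.2 ≥ 3 then st.1 + 1 else st.1, 0))
            (s, c + 1) t) := by simp [List.foldl, hr]
        rw [step, ih s (c + 1) (by omega)]
        have hbm : pvBM (r :: t) = true :: pvBM t := by simp [pvBM, hr]
        rw [hbm]
        -- compare prefixes of trues
        rcases Nat.lt_or_ge c.toNat 3 with h3 | h3
        · have : min (c + 1).toNat 3 = min c.toNat 3 + 1 := by omega
          rw [this]
          have : List.replicate (min c.toNat 3 + 1) true ++ pvBM t
               = List.replicate (min c.toNat 3) true ++ true :: pvBM t := by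
            rw [List.replicate_succ']
            simp
          rw [this]
        · have h1 : min (c + 1).toNat 3 = 3 := by omega
          have h2 : min c.toNat 3 = 3 := by omega
          rw [h1, h2]
          show s + pvW (true :: true :: true :: pvBM t)
             = s + pvW (true :: true :: true :: true :: pvBM t)
          rw [pvW_tttt]
      · have hr' : ¬ r < 1 := hr
        have step : (List.foldl
            (fun (st : Int × Int) rain =>
              if rain < 1 then (st.1, st.2 + 1)
              else (if st.2 ≥ 3 then st.1 + 1 else st.1, 0))
            (s, c) (r :: t)) = (List.foldl
            (fun (st : Int × Int) rain =>
              if rain < 1 then (st.1, st.2 + 1)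
              else (if st.2 ≥ 3 then st.1 + 1 else st.1, 0))
            ((if c ≥ 3 then s + 1 else s), 0) t) := by simp [List.foldl, hr']
        rw [step, ih _ 0 le_rfl]
        have hbm : pvBM (r :: t) = false :: pvBM t := by simp [pvBM, hr']
        rw [hbm]
        simp only [Int.toNat_zero, Nat.zero_min, List.replicate_zero, List.nil_append]
        by_cases hc3 : c ≥ 3
        · have : min c.toNat 3 = 3 := by omega
          rw [this]
          show (if c ≥ 3 then s + 1 else s) + pvW (pvBM t)
             = s + pvW (true :: true :: true :: false :: pvBM t)
          rw [pvW_tttf, if_pos hc3]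
          ring
        · rw [if_neg hc3]
          have hlt : min c.toNat 3 = c.toNat := by omega
          rw [hlt]
          have : c.toNat = 0 ∨ c.toNat = 1 ∨ c.toNat = 2 := by omega
          rcases this with h | h | h <;> rw [h]
          · simp [pvW_false]
          · simp [List.replicate, pvW_tf]
          · simp [List.replicate, pvW_ttf]

-- B computes the window count of the bitmap
theorem pvB_eq_pvW (xs : List Int) : count_dry_spells_py_alt xs = pvW (pvBM xs) := by
  induction xs with
  | nil => rfl
  | cons a t ih =>
      match t, ih with
      | [], _ => rfl
      | [b], _ => rfl
      | [b, c], _ => rfl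
      | b :: c :: d :: r, ih =>
          have hd : (!decide (d < 1)) = decide (1 ≤ d) := by
            by_cases h : d < 1 <;> simp [h] <;> omega
          have lhs : count_dry_spells_py_alt (a :: b :: c :: d :: r)
              = (if (decide (a < 1) && decide (b < 1) && decide (c < 1) && decide (1 ≤ d)) = true
                  then 1 else 0)
                + count_dry_spells_py_alt (b :: c :: d :: r) := by
            simp only [count_dry_spells_py_alt, List.drop, List.zip_cons_cons, List.filter_cons]
            by_cases hP : (decide (a < 1) && decide (b < 1) && decide (c < 1) && decide (1 ≤ d)) = true
            · simp [hP]
              omega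
            · simp [hP]
          rw [lhs, ih]
          show _ = pvW (pvBM (a :: b :: c :: d :: r))
          simp only [pvBM, List.map, pvW, hd]

-- ===== VERDICT (by name: the statement is the Claim_ definition above) =====
theorem count_dry_spells_py_spec : Claim_equal_count_dry_spells_py := by
  intro xs _
  unfold Spec_count_dry_spells_py count_dry_spells_py
  rw [pvB_eq_pvW, pvA_invariant xs 0 0 le_rfl]
  simp
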